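-- pv_equiv track=rewrite | github.com/data-pirate/Data-structures-in-python | P0/Task4.py | identify_telemarketers
-- ===== SOURCE A (Python) =====
-- def identify_telemarketers(calls, texts):
--     callers = set(number[0] for number in calls)
--     recievers = set(number[1] for number in calls)
--     text_senders = set(number[0] for number in texts)
--     text_recievers = set(number[1] for number in texts)
--
--     telemarketers = set()
--
--     for each in callers:
--         if (each not in recievers and
--            each not in text_senders and
--            each not in text_recievers):
--             telemarketers.add(each)
--
--     return telemarketers
-- ===== SOURCE B (Python) =====
-- def identify_telemarketers(calls, texts):
--     # One fused pass: a table number -> (appeared as caller, appeared in any other role).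
--     roles = {}
--
--     def mark(num, as_caller):
--         c, o = roles.get(num, (False, False))
--         roles[num] = (c or as_caller, o or not as_caller)
--
--     for caller, callee in calls:
--         mark(caller, True)
--         mark(callee, False)
--     for sender, receiver in texts:
--         mark(sender, False)
--         mark(receiver, False)
--
--     return {num for num, (c, o) in roles.items() if c and not o}
-- ===== Notes on version B (the rewrite author's own statement) =====
-- stated objective: alternative
-- what changed: Replaces A's four separately-built sets plus a loop with three membership tests by one fused pass over calls and texts that builds a single number -> (appeared-as-caller, appeared-in-any-other-role) table, then selects the numbers flagged caller-only in one filter.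
import Mathlib
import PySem

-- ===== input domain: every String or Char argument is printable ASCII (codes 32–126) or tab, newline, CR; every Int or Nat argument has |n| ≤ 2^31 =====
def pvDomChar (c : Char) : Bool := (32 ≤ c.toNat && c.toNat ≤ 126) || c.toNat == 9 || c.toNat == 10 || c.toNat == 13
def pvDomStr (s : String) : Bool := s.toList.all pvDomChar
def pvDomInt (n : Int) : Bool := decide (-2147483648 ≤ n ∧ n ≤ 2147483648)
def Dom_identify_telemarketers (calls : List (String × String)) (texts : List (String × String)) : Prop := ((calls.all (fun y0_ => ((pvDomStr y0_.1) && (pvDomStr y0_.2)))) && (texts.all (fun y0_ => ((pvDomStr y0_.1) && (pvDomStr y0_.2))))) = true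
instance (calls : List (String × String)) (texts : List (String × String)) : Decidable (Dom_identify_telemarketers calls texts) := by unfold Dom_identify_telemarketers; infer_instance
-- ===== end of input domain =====

-- B replaces A's four separate sets and three-membership loop with one fused pass building a
-- number → (caller?, other-role?) table and a single filter over it (objective: alternative).
-- Both Pythons return a set, so only the membership of the result is observable; the ports
-- realise the sets as lists of the distinct elements and are proved list-equal.

-- ===== PORT A =====
def identify_telemarketers (calls : List (String × String)) (texts : List (String × String)) : List String :=
  let callers := PySem.Set.ofList (calls.map (fun number => number.1))
  let recievers := PySem.Set.ofList (calls.map (fun number => number.2))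
  let text_senders := PySem.Set.ofList (texts.map (fun number => number.1))
  let text_recievers := PySem.Set.ofList (texts.map (fun number => number.2))
  callers.foldl (fun telemarketers each =>
    if (!(PySem.Set.contains recievers each) &&
        !(PySem.Set.contains text_senders each) &&
        !(PySem.Set.contains text_recievers each)) then
      PySem.Set.add telemarketers each
    else telemarketers) PySem.Set.empty

-- ===== PORT B =====
-- helper `mark` of Source B: record that `num` played the caller role (asCaller) or some other role
def markRole (roles : PySem.Dict String (Bool × Bool)) (num : String) (asCaller : Bool) :
    PySem.Dict String (Bool × Bool) :=
  roles.modify num (false, false) (fun co => (co.1 || asCaller, co.2 || !asCaller))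

def identify_telemarketers_alt (calls : List (String × String)) (texts : List (String × String)) : List String :=
  let rolesAfterCalls := calls.foldl
    (fun roles p => markRole (markRole roles p.1 true) p.2 false) PySem.Dict.empty
  let roles := texts.foldl
    (fun roles p => markRole (markRole roles p.1 false) p.2 false) rolesAfterCalls
  PySem.Set.ofList ((roles.items.filter (fun kv => kv.2.1 && !kv.2.2)).map (fun kv => kv.1))

-- ===== PRECONDITION & SPEC =====
def Spec_identify_telemarketers (calls : List (String × String)) (texts : List (String × String)) (out : List String) : Prop := out = identify_telemarketers_alt calls texts
instance (calls : List (String × String)) (texts : List (String × String)) (out : List String) : Decidable (Spec_identify_telemarketers calls texts out) := by unfold Spec_identify_telemarketers; infer_instance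

-- ===== CLAIM (what is proved, stated in full; the proofs are below) =====
def Claim_equal_identify_telemarketers : Prop := ∀ (calls : List (String × String)) (texts : List (String × String)), Dom_identify_telemarketers calls texts → Spec_identify_telemarketers calls texts (identify_telemarketers calls texts)

-- ===== LEMMAS AND PROOFS =====

-- keys of one mark step grow like Set.add
theorem keys_markRole (d : PySem.Dict String (Bool × Bool)) (n : String) (b : Bool) :
    (markRole d n b).keys = PySem.Set.add d.keys n := by
  rw [markRole, PySem.Dict.keys_modify, PySem.Set.add]
  by_cases h : d.contains n = true
  · rw [PySem.Dict.keys_insert_of_contains _ _ h]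
    simp [(PySem.Dict.contains_iff_mem_keys d n).mp h]
  · rw [PySem.Dict.keys_insert_of_not_contains _ _ (by simpa using h)]
    have hn : n ∉ d.keys := fun hm => h ((PySem.Dict.contains_iff_mem_keys d n).mpr hm)
    simp [hn]

-- lookup through one mark step
theorem getD_markRole (d : PySem.Dict String (Bool × Bool)) (n : String) (b : Bool) (k : String) :
    (markRole d n b).getD k (false, false) =
      if k = n then ((d.getD n (false, false)).1 || b, (d.getD n (false, false)).2 || !b)
      else d.getD k (false, false) := by
  rw [markRole, PySem.Dict.getD_modify]

-- the role table after one marking pass over a list of pairs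
theorem getD_markFold (l : List (String × String)) (b : Bool)
    (d : PySem.Dict String (Bool × Bool)) (k : String) :
    ((l.foldl (fun d p => markRole (markRole d p.1 b) p.2 false) d).getD k (false, false)) =
      ((d.getD k (false, false)).1 || (b && decide (k ∈ l.map Prod.fst)),
       ((d.getD k (false, false)).2 || (!b && decide (k ∈ l.map Prod.fst))) ||
         decide (k ∈ l.map Prod.snd)) := by
  induction l generalizing d with
  | nil => simp
  | cons p l ih =>
    simp only [List.foldl_cons, ih, getD_markRole, List.map_cons, List.mem_cons]
    by_cases h1 : k = p.1 <;> by_cases h2 : k = p.2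
    · have e : p.1 = p.2 := h1.symm.trans h2
      simp [h1, ← e]
      exact fun hb _ _ => Or.inr hb
    · have e : ¬ p.1 = p.2 := fun hh => h2 (h1.trans hh)
      simp [h1, e]
      refine ⟨fun hb _ _ => Or.inr hb, ?_⟩
      cases b <;> simp
    · have e : ¬ p.2 = p.1 := fun hh => h1 (h2.trans hh)
      simp [h2, e]
    · simp [h1, h2]

-- keys after one marking pass
theorem keys_markFold (l : List (String × String)) (b : Bool)
    (d : PySem.Dict String (Bool × Bool)) :
    (l.foldl (fun d p => markRole (markRole d p.1 b) p.2 false) d).keys =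
      PySem.Set.update d.keys (l.flatMap (fun p => [p.1, p.2])) := by
  induction l generalizing d with
  | nil => simp [PySem.Set.update]
  | cons p l ih =>
    simp only [List.foldl_cons, ih, keys_markRole, List.flatMap_cons]
    simp only [List.cons_append, List.nil_append, PySem.Set.update_cons]

-- A's accumulation loop over a duplicate-free list is a filter
theorem foldl_add_if {α : Type} [BEq α] [LawfulBEq α] (p : α → Bool) :
    ∀ (l : List α) (s : PySem.Set α), l.Nodup → (∀ x ∈ l, x ∉ s) →
      l.foldl (fun s x => if p x then PySem.Set.add s x else s) s = s ++ l.filter p := by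
  intro l
  induction l with
  | nil => simp
  | cons x l ih =>
    intro s hnd hfr
    simp only [List.foldl_cons, List.filter_cons]
    by_cases hp : p x = true
    · rw [if_pos hp, if_pos hp, PySem.Set.add_of_not_mem (hfr x (by simp))]
      rw [ih _ (List.Nodup.of_cons hnd) ?_]
      · simp
      · intro y hy
        simp only [List.mem_append, List.mem_singleton]
        rintro (h | rfl)
        · exact hfr y (by simp [hy]) h
        · exact (List.nodup_cons.mp hnd).1 hy
    · rw [if_neg hp, if_neg hp, ih _ (List.Nodup.of_cons hnd) (fun y hy => hfr y (by simp [hy]))]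

-- deduplication commutes with filtering
theorem ofList_filter {α : Type} [BEq α] [LawfulBEq α] (q : α → Bool) (xs : List α) :
    (PySem.Set.ofList xs).filter q = PySem.Set.ofList (xs.filter q) := by
  induction xs using List.reverseRecOn with
  | nil => simp
  | append_singleton xs x ih =>
    rw [PySem.Set.ofList_append_singleton, List.filter_append, PySem.Set.add_eq_ite]
    by_cases hm : x ∈ PySem.Set.ofList xs
    · rw [if_pos hm, List.filter_cons]
      by_cases hq : q x = true
      · rw [if_pos hq]
        rw [ih, List.filter_nil, PySem.Set.ofList_append_singleton, PySem.Set.add_eq_ite,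
          if_pos ?_]
        rw [PySem.Set.mem_ofList]
        exact List.mem_filter.mpr ⟨(PySem.Set.mem_ofList xs x).mp hm, hq⟩
      · simp only [Bool.not_eq_true] at hq
        simp [hq, ih]
    · rw [if_neg hm, List.filter_append, List.filter_cons]
      by_cases hq : q x = true
      · rw [if_pos hq, ih, List.filter_nil, PySem.Set.ofList_append_singleton,
          PySem.Set.add_eq_ite, if_neg ?_]
        rw [PySem.Set.mem_ofList]
        intro hmem
        exact hm ((PySem.Set.mem_ofList xs x).mpr (List.mem_filter.mp hmem).1)
      · simp only [Bool.not_eq_true] at hq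
        simp [hq, ih]

-- under a predicate false on every second component, the flattened pair stream filters
-- to the filtered first components
theorem filter_flatMap_pairs {α : Type} (P : α → Bool) (l : List (α × α))
    (h : ∀ p ∈ l, P p.2 = false) :
    (l.flatMap (fun p => [p.1, p.2])).filter P = (l.map Prod.fst).filter P := by
  induction l with
  | nil => simp
  | cons p l ih =>
    simp only [List.flatMap_cons, List.map_cons, List.filter_append, List.filter_cons,
      h p (by simp)]
    rw [ih (fun q hq => h q (by simp [hq]))]
    by_cases hp : P p.1 = true <;> simp [hp]

-- B computes a filter of the deduplicated event stream
theorem altB_char (calls texts : List (String × String)) :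
    identify_telemarketers_alt calls texts =
      PySem.Set.ofList
        ((calls.flatMap (fun p => [p.1, p.2]) ++ texts.flatMap (fun p => [p.1, p.2])).filter
          (fun k => decide (k ∈ calls.map Prod.fst) &&
            !((decide (k ∈ calls.map Prod.snd) || decide (k ∈ texts.map Prod.fst)) ||
              decide (k ∈ texts.map Prod.snd)))) := by
  have hkeys : (texts.foldl (fun roles p => markRole (markRole roles p.1 false) p.2 false)
      (calls.foldl (fun roles p => markRole (markRole roles p.1 true) p.2 false)
        PySem.Dict.empty)).keys =
      PySem.Set.ofList (calls.flatMap (fun p => [p.1, p.2]) ++ texts.flatMap (fun p => [p.1, p.2])) := by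
    rw [keys_markFold, keys_markFold, PySem.Dict.keys_empty, PySem.Set.update_nil_left,
      ← PySem.Set.ofList_append]
  have hnd : (texts.foldl (fun roles p => markRole (markRole roles p.1 false) p.2 false)
      (calls.foldl (fun roles p => markRole (markRole roles p.1 true) p.2 false)
        PySem.Dict.empty)).keys.Nodup := by
    rw [hkeys]; exact PySem.Set.nodup_ofList _
  simp only [identify_telemarketers_alt]
  rw [PySem.Dict.items_eq_map_keys _ hnd (false, false), List.filter_map, List.map_map]
  have hcomp : ∀ k : String,
      ((texts.foldl (fun roles p => markRole (markRole roles p.1 false) p.2 false)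
        (calls.foldl (fun roles p => markRole (markRole roles p.1 true) p.2 false)
          PySem.Dict.empty)).getD k (false, false)) =
      (decide (k ∈ calls.map Prod.fst),
        (decide (k ∈ calls.map Prod.snd) || decide (k ∈ texts.map Prod.fst)) ||
          decide (k ∈ texts.map Prod.snd)) := by
    intro k
    rw [getD_markFold, getD_markFold, PySem.Dict.getD_empty]
    simp
  have hpred : (List.filter
        ((fun kv => kv.2.1 && !kv.2.2) ∘ fun k =>
          (k, ((texts.foldl (fun roles p => markRole (markRole roles p.1 false) p.2 false)
            (calls.foldl (fun roles p => markRole (markRole roles p.1 true) p.2 false)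
              PySem.Dict.empty)).getD k (false, false))))
        (texts.foldl (fun roles p => markRole (markRole roles p.1 false) p.2 false)
          (calls.foldl (fun roles p => markRole (markRole roles p.1 true) p.2 false)
            PySem.Dict.empty)).keys) =
      (List.filter (fun k => decide (k ∈ calls.map Prod.fst) &&
          !((decide (k ∈ calls.map Prod.snd) || decide (k ∈ texts.map Prod.fst)) ||
            decide (k ∈ texts.map Prod.snd)))
        (texts.foldl (fun roles p => markRole (markRole roles p.1 false) p.2 false)
          (calls.foldl (fun roles p => markRole (markRole roles p.1 true) p.2 false)
            PySem.Dict.empty)).keys) := by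
    apply List.filter_congr
    intro k _
    simp [hcomp k]
  rw [hpred]
  simp only [Function.comp_def, List.map_id']
  rw [hkeys, ofList_filter, PySem.Set.ofList_ofList]

-- ===== VERDICT (by name: the statement is the Claim_ definition above) =====
theorem identify_telemarketers_spec : Claim_equal_identify_telemarketers := by
  intro calls texts _
  unfold Spec_identify_telemarketers
  rw [altB_char]
  simp only [identify_telemarketers]
  rw [foldl_add_if _ _ PySem.Set.empty (PySem.Set.nodup_ofList _) (by simp [PySem.Set.empty])]
  rw [ofList_filter]
  rw [List.filter_append]
  have htexts : (List.filter (fun k => decide (k ∈ calls.map Prod.fst) &&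
      !((decide (k ∈ calls.map Prod.snd) || decide (k ∈ texts.map Prod.fst)) ||
        decide (k ∈ texts.map Prod.snd)))
      (texts.flatMap (fun p => [p.1, p.2]))) = [] := by
    rw [List.filter_eq_nil_iff]
    intro a ha
    simp only [List.mem_flatMap] at ha
    obtain ⟨p, hp, hm⟩ := ha
    simp only [List.mem_cons, List.not_mem_nil, or_false] at hm
    rcases hm with rfl | rfl
    · have h1 : p.1 ∈ texts.map Prod.fst := List.mem_map.mpr ⟨p, hp, rfl⟩
      simp [h1]
    · have h2 : p.2 ∈ texts.map Prod.snd := List.mem_map.mpr ⟨p, hp, rfl⟩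
      simp [h2]
  rw [htexts, List.append_nil]
  rw [filter_flatMap_pairs _ calls (fun p hp => by
    have h2 : p.2 ∈ calls.map Prod.snd := List.mem_map.mpr ⟨p, hp, rfl⟩
    simp [h2])]
  simp only [PySem.Set.empty, List.nil_append]
  have hmap : calls.map (fun number => number.1) = calls.map Prod.fst := rfl
  rw [hmap]
  congr 1
  apply List.filter_congr
  intro k hk
  have hk1 : k ∈ calls.map Prod.fst := hk
  have e2 : (PySem.Set.ofList (calls.map (fun number => number.2))).contains k =
      decide (k ∈ calls.map Prod.snd) := by
    by_cases h : k ∈ calls.map Prod.snd <;>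
      simp [h, PySem.Set.mem_ofList]
  have e3 : (PySem.Set.ofList (texts.map (fun number => number.1))).contains k =
      decide (k ∈ texts.map Prod.fst) := by
    by_cases h : k ∈ texts.map Prod.fst <;>
      simp [h, PySem.Set.mem_ofList]
  have e4 : (PySem.Set.ofList (texts.map (fun number => number.2))).contains k =
      decide (k ∈ texts.map Prod.snd) := by
    by_cases h : k ∈ texts.map Prod.snd <;>
      simp [h, PySem.Set.mem_ofList]
  rw [e2, e3, e4]
  simp only [hk1, decide_true, Bool.true_and, Bool.not_or, Bool.and_assoc]
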